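-- pv_equiv track=rewrite | github.com/Publilab/Linkedin_Searching-Job | backend/app/services/profile_ai_service.py | _select_primary_skill
-- ===== SOURCE A (Python) =====
-- def _select_primary_skill(skills: list[str]) -> str | None:
--     if not skills:
--         return None
--
--     preferred = [
--         "python",
--         "sql",
--         "r",
--         "analisis de datos",
--         "data",
--         "gestion publica",
--         "politicas publicas",
--     ]
--     low_skills = [s.lower() for s in skills]
--
--     for candidate in preferred:
--         for idx, skill in enumerate(low_skills):
--             if candidate == skill or candidate in skill:
--                 return skills[idx]
--
--     for skill in skills:
--         if skill.lower() not in {"excel", "microsoft office", "office"}: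
--             return skill
--
--     return skills[0]
-- ===== SOURCE B (Python) =====
-- def _select_primary_skill(skills: list[str]) -> str | None:
--     if not skills:
--         return None
--
--     preferred = [
--         "python",
--         "sql",
--         "r",
--         "analisis de datos",
--         "data",
--         "gestion publica",
--         "politicas publicas",
--     ]
--
--     best_rank = None
--     best_idx = None
--     for idx, skill in enumerate(skills):
--         low = skill.lower()
--         for rank, cand in enumerate(preferred):
--             if cand in low:
--                 if best_rank is None or rank < best_rank:
--                     best_rank, best_idx = rank, idx
--                 break
--
--     if best_idx is not None:
--         return skills[best_idx]
--
--     generic = {"excel", "microsoft office", "office"}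
--     return next((s for s in skills if s.lower() not in generic), skills[0])
-- ===== Notes on version B (the rewrite author's own statement) =====
-- stated objective: alternative
-- what changed: Phase 1 is rewritten from A's candidate-outer nested loops with early return into a single pass over the skills keeping a running (best_rank, best_idx) minimum (strict '<' keeps the earliest index on rank ties), and the fallback becomes a next()/find-first expression; one pass over skills instead of up to 7.
import Mathlib
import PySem

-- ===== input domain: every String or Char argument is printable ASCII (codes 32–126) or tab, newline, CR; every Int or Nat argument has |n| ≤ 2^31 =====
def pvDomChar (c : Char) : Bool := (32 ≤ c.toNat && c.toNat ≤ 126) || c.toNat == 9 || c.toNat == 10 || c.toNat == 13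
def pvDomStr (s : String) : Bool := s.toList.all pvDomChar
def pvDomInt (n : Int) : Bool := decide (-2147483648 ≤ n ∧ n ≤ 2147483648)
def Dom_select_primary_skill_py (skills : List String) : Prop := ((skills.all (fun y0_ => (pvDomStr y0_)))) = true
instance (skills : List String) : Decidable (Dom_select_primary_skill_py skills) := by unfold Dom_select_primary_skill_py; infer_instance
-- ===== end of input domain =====

-- B replaces A's candidate-outer nested loops with a single pass over the skills that keeps a
-- running (best_rank, best_idx) strict minimum; same result, one skills pass (alternative decomposition).


-- ===== PORT A =====
def pvPreferred : List String :=
  ["python", "sql", "r", "analisis de datos", "data", "gestion publica", "politicas publicas"]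

def pvGenericSet : PySem.Set String := PySem.Set.ofList ["excel", "microsoft office", "office"]

-- inner loop: 'for idx, skill in enumerate(low_skills): if candidate == skill or candidate in skill: return skills[idx]'
def pvA_inner (candidate : String) (pairs : List (Int × String)) : Option Int :=
  match pairs with
  | [] => none
  | (idx, skill) :: rest =>
      if candidate == skill || PySem.Str.isIn candidate skill then some idx
      else pvA_inner candidate rest

-- outer loop: 'for candidate in preferred: …'
def pvA_outer (cands : List String) (pairs : List (Int × String)) : Option Int :=
  match cands with
  | [] => none
  | c :: rest =>
      match pvA_inner c pairs with
      | some i => some i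
      | none => pvA_outer rest pairs

-- 'for skill in skills: if skill.lower() not in {…}: return skill'
def pvA_fallback (skills : List String) : Option String :=
  match skills with
  | [] => none
  | s :: rest =>
      if !(PySem.Set.contains pvGenericSet (PySem.Str.lower s)) then some s
      else pvA_fallback rest

def select_primary_skill_py (skills : List String) : Option String :=
  if skills.isEmpty then none
  else
    let low_skills := skills.map PySem.Str.lower
    match pvA_outer pvPreferred (PySem.List.enumerate low_skills) with
    | some i => PySem.List.pyGet? skills i
    | none =>
        match pvA_fallback skills with
        | some s => some s
        | none => PySem.List.pyGet? skills 0

-- ===== PORT B =====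
-- inner 'for rank, cand in enumerate(preferred): if cand in low: … break' (rank counter carried)
def pvB_rank (cands : List String) (r : Nat) (low : String) : Option Nat :=
  match cands with
  | [] => none
  | c :: rest => if PySem.Str.isIn c low then some r else pvB_rank rest (r + 1) low

-- body of one iteration of B's skills pass: update (best_rank, best_idx)
def pvB_step (best : Option (Nat × Nat)) (idx : Nat) (low : String) : Option (Nat × Nat) :=
  match pvB_rank pvPreferred 0 low with
  | none => best
  | some r =>
      match best with
      | none => some (r, idx)
      | some (br, bi) => if r < br then some (r, idx) else some (br, bi)

-- 'for idx, skill in enumerate(skills): …'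
def pvB_scan (skills : List String) (idx : Nat) (best : Option (Nat × Nat)) : Option (Nat × Nat) :=
  match skills with
  | [] => best
  | s :: rest => pvB_scan rest (idx + 1) (pvB_step best idx (PySem.Str.lower s))

def select_primary_skill_py_alt (skills : List String) : Option String :=
  match skills with
  | [] => none
  | s0 :: _ =>
      match pvB_scan skills 0 none with
      | some (_, bi) => skills[bi]?
      | none =>
          some ((skills.find? (fun s => !(PySem.Set.contains pvGenericSet (PySem.Str.lower s)))).getD s0)

-- ===== PRECONDITION & SPEC =====
def Spec_select_primary_skill_py (skills : List String) (out : Option String) : Prop := out = select_primary_skill_py_alt skills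
instance (skills : List String) (out : Option String) : Decidable (Spec_select_primary_skill_py skills out) := by unfold Spec_select_primary_skill_py; infer_instance

-- ===== CLAIM (what is proved, stated in full; the proofs are below) =====
def Claim_equal_select_primary_skill_py : Prop := ∀ (skills : List String), Dom_select_primary_skill_py skills → Spec_select_primary_skill_py skills (select_primary_skill_py skills)

-- ===== LEMMAS AND PROOFS =====

-- rank of a (lowered) skill w.r.t. a candidate list, structural form
def pvRank (cands : List String) (low : String) : Option Nat :=
  match cands with
  | [] => none
  | c :: rest => if PySem.Str.isIn c low then some 0 else (pvRank rest low).map (· + 1)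

-- left-biased minimum on (rank, idx) candidates: strictly smaller rank on the right wins
def pvComb (a b : Option (Nat × Nat)) : Option (Nat × Nat) :=
  match a, b with
  | none, b => b
  | a, none => a
  | some (br, bi), some (r, i) => if r < br then some (r, i) else some (br, bi)

def pvEntry (cands : List String) (low : String) (i : Nat) : Option (Nat × Nat) :=
  (pvRank cands low).map (fun r => (r, i))

-- reference result of phase 1: best (rank, idx) over the (already lowered) list, indices from i
def pvG (cands : List String) (lows : List String) (i : Nat) : Option (Nat × Nat) :=
  match lows with
  | [] => none
  | s :: t => pvComb (pvEntry cands s i) (pvG cands t (i + 1))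

theorem pvComb_none_right (a : Option (Nat × Nat)) : pvComb a none = a := by
  rcases a with _ | ⟨x, y⟩ <;> rfl

theorem pvComb_some_some (p q : Nat × Nat) :
    pvComb (some p) (some q) = if q.1 < p.1 then some q else some p := by
  rcases p with ⟨a, b⟩; rcases q with ⟨c, d⟩; rfl

theorem pvComb_assoc (a b c : Option (Nat × Nat)) :
    pvComb (pvComb a b) c = pvComb a (pvComb b c) := by
  rcases a with _ | ⟨ar, ai⟩ <;> rcases b with _ | ⟨br, bi⟩ <;> rcases c with _ | ⟨cr, ci⟩ <;>
    simp only [pvComb, pvComb_none_right, pvComb_some_some] <;>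
    split_ifs <;>
    simp only [pvComb, pvComb_none_right, pvComb_some_some] <;>
    (try split_ifs) <;> first | rfl | (exfalso; omega)

theorem pvB_rank_shift (cands : List String) (r : Nat) (low : String) :
    pvB_rank cands r low = (pvRank cands low).map (· + r) := by
  induction cands generalizing r with
  | nil => rfl
  | cons c rest ih =>
      simp only [pvB_rank, pvRank]
      split
      · simp
      · rw [ih]
        rcases h : pvRank rest low with _ | v
        · simp
        · simp [Nat.add_comm, Nat.add_assoc, Nat.add_left_comm]

theorem pvB_step_eq (b : Option (Nat × Nat)) (i : Nat) (low : String) :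
    pvB_step b i low = pvComb b (pvEntry pvPreferred low i) := by
  simp only [pvB_step, pvEntry, pvB_rank_shift]
  rcases h : pvRank pvPreferred low with _ | r
  · rcases b with _ | ⟨br, bi⟩ <;> simp [pvComb]
  · rcases b with _ | ⟨br, bi⟩ <;> simp [pvComb]

theorem pvB_scan_eq (skills : List String) (i : Nat) (b : Option (Nat × Nat)) :
    pvB_scan skills i b = pvComb b (pvG pvPreferred (skills.map PySem.Str.lower) i) := by
  induction skills generalizing i b with
  | nil => rcases b with _ | ⟨br, bi⟩ <;> rfl
  | cons s t ih =>
      simp only [pvB_scan, List.map_cons, pvG, ih, pvB_step_eq, pvComb_assoc]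

theorem pv_cond_eq (c s : String) :
    (c == s || PySem.Str.isIn c s) = PySem.Str.isIn c s := by
  rcases h : c == s with _ | _
  · simp
  · have : c = s := by simpa using h
    subst this
    simp [PySem.Chars.isIn_iff_infix]

theorem pvA_inner_eq (c : String) (lows : List String) (i : Nat) :
    pvA_inner c (PySem.List.enumerate lows (i : Int)) =
      (lows.findIdx? (fun s => PySem.Str.isIn c s)).map (fun k => ((i + k : Nat) : Int)) := by
  induction lows generalizing i with
  | nil => simp [pvA_inner, PySem.List.enumerate_nil]
  | cons s t ih =>
      rw [PySem.List.enumerate_cons]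
      simp only [pvA_inner, pv_cond_eq, List.findIdx?_cons]
      rcases h : PySem.Str.isIn c s with _ | _
      · rw [if_neg (by simp [h]), if_neg (by simp)]
        have hcast : ((i : Int) + 1) = ((i + 1 : Nat) : Int) := by push_cast; ring
        rw [hcast, ih]
        rcases hf : t.findIdx? (fun s => PySem.Str.isIn c s) with _ | k
        · simp
        · simp only [Option.map_some]
          congr 2
          omega
      · rw [if_pos (by simp [h]), if_pos rfl]
        simp

-- if some low matches c, pvG for (c :: rest) is the first such index at rank 0
theorem pvG_cons_match (c : String) (rest : List String) (lows : List String) (i k : Nat)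
    (h : lows.findIdx? (fun s => PySem.Str.isIn c s) = some k) :
    pvG (c :: rest) lows i = some (0, i + k) := by
  induction lows generalizing i k with
  | nil => simp at h
  | cons s t ih =>
      rw [List.findIdx?_cons] at h
      simp only [pvG, pvEntry, pvRank]
      rcases hs : PySem.Str.isIn c s with _ | _
      · have hs' : PySem.Chars.isIn c.toList s.toList = false := by simpa using hs
        rw [if_neg (by simp [hs'])] at h
        rw [if_neg (by simp [hs'])]
        rcases hf : t.findIdx? (fun s => PySem.Str.isIn c s) with _ | k'
        · rw [hf] at h; simp at h
        · rw [hf] at h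
          simp only [Option.map_some] at h
          obtain rfl : k' + 1 = k := by simpa using h
          rw [ih (i + 1) k' hf]
          rcases hr : pvRank rest s with _ | r <;>
            simp [hr, pvComb, Nat.add_comm, Nat.add_assoc, Nat.add_left_comm]
      · have hs' : PySem.Chars.isIn c.toList s.toList = true := by simpa using hs
        rw [if_pos (by simp [hs'])] at h
        obtain rfl : (0 : Nat) = k := by simpa using h
        rw [if_pos rfl]
        rcases hg : pvG (c :: rest) t (i + 1) with _ | ⟨r, j⟩ <;> simp [hg, pvComb]

-- if no low matches c, pvG for (c :: rest) is pvG for rest with all ranks shifted up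
theorem pvG_cons_nomatch (c : String) (rest : List String) (lows : List String) (i : Nat)
    (h : ∀ s ∈ lows, PySem.Str.isIn c s = false) :
    pvG (c :: rest) lows i = (pvG rest lows i).map (fun p => (p.1 + 1, p.2)) := by
  induction lows generalizing i with
  | nil => rfl
  | cons s t ih =>
      have hs : PySem.Str.isIn c s = false := h s (by simp)
      have hs' : PySem.Chars.isIn c.toList s.toList = false := by simpa using hs
      have ht : ∀ s ∈ t, PySem.Str.isIn c s = false := fun x hx => h x (by simp [hx])
      simp only [pvG, pvEntry, pvRank]
      rw [if_neg (by simp [hs']), ih (i + 1) ht]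
      rcases hr : pvRank rest s with _ | r <;>
        rcases hg : pvG rest t (i + 1) with _ | ⟨r', j⟩ <;>
          simp [hr, hg, pvComb] <;> split_ifs <;>
          first | rfl | omega | (exfalso; omega) | simp_all

theorem pvG_nil_cands (lows : List String) (i : Nat) : pvG ([] : List String) lows i = none := by
  induction lows generalizing i with
  | nil => rfl
  | cons s t ih => simp [pvG, pvEntry, pvRank, pvComb, ih]

theorem pvA_outer_eq (cands : List String) (lows : List String) :
    pvA_outer cands (PySem.List.enumerate lows) =
      (pvG cands lows 0).map (fun p => ((p.2 : Nat) : Int)) := by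
  induction cands with
  | nil => simp [pvA_outer, pvG_nil_cands]
  | cons c rest ih =>
      have hinner : pvA_inner c (PySem.List.enumerate lows) =
          (lows.findIdx? (fun s => PySem.Str.isIn c s)).map (fun k => ((k : Nat) : Int)) := by
        have := pvA_inner_eq c lows 0
        simpa using this
      simp only [pvA_outer, hinner]
      rcases hf : lows.findIdx? (fun s => PySem.Str.isIn c s) with _ | k
      · have hnone : ∀ s ∈ lows, PySem.Str.isIn c s = false := by
          simpa using List.findIdx?_eq_none_iff.mp hf
        simp only [Option.map_none]
        rw [ih, pvG_cons_nomatch c rest lows 0 hnone]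
        rcases hg : pvG rest lows 0 with _ | ⟨r, j⟩ <;> simp
      · rw [pvG_cons_match c rest lows 0 k hf]
        simp

theorem pvA_fallback_eq (skills : List String) :
    pvA_fallback skills =
      skills.find? (fun s => !(PySem.Set.contains pvGenericSet (PySem.Str.lower s))) := by
  induction skills with
  | nil => rfl
  | cons s t ih =>
      simp only [pvA_fallback, List.find?_cons]
      rcases h : (!(PySem.Set.contains pvGenericSet (PySem.Str.lower s))) with _ | _ <;>
        simp [h, ih]

-- ===== VERDICT (by name: the statement is the Claim_ definition above) =====
theorem select_primary_skill_py_spec : Claim_equal_select_primary_skill_py := by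
  intro skills _
  show select_primary_skill_py skills = select_primary_skill_py_alt skills
  rcases skills with _ | ⟨s0, rest⟩
  · rfl
  · simp only [select_primary_skill_py, select_primary_skill_py_alt, List.isEmpty_cons,
      Bool.false_eq_true, if_false]
    rw [pvA_outer_eq, pvB_scan_eq]
    rcases hg : pvG pvPreferred ((s0 :: rest).map PySem.Str.lower) 0 with _ | ⟨r, bi⟩
    · simp only [Option.map_none, pvComb, pvA_fallback_eq]
      rcases hf : (s0 :: rest).find?
          (fun s => !(PySem.Set.contains pvGenericSet (PySem.Str.lower s))) with _ | x
      · rw [show (0 : Int) = ((0 : Nat) : Int) from rfl, PySem.List.pyGet?_natCast]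
        simp
      · simp
    · simp only [Option.map_some, pvComb]
      rw [PySem.List.pyGet?_natCast]
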